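-- pv_equiv track=rewrite | github.com/agray998/python-daily-challenges | programs/alphasort.py | alpha_sort
-- ===== SOURCE A (Python) =====
-- def alpha_sort(string):
--     word_list = string.split()
--     no_dup = list(set(word_list))
--     no_dup.sort()
--     outstr = f"{no_dup[0]}"
--     for i in range(1, len(no_dup)):
--         outstr += f" {no_dup[i]}"
--     return outstr
-- ===== SOURCE B (Python) =====
-- def alpha_sort(string):
--     words = sorted(string.split())
--     outstr = words[0]
--     prev = words[0]
--     for w in words[1:]:
--         if w != prev:
--             outstr += " " + w
--             prev = w
--     return outstr
-- ===== Notes on version B (the rewrite author's own statement) =====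
-- stated objective: alternative
-- what changed: B sorts the full word list with duplicates and deduplicates in one pass by adjacency (tracking the previous word) instead of building a hash set before sorting.
import Mathlib
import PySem

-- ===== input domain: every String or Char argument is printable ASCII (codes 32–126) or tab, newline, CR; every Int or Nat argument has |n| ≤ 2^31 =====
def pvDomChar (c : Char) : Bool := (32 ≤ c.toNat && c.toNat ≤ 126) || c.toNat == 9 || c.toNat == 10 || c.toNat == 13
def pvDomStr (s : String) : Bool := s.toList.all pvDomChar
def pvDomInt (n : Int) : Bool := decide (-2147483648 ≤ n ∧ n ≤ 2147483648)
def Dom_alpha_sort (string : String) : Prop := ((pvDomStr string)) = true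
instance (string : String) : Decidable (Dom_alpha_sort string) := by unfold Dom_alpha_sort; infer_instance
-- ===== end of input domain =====

-- B deduplicates by adjacency in one pass over the fully sorted word list instead of
-- building a set before sorting (objective: alternative; same result, same cost).

-- ===== PORT A =====
def alpha_sort (string : String) : String :=
  let word_list := PySem.Str.split₀ string
  let no_dup := PySem.List.sorted (PySem.Set.ofList word_list) (fun x => x)
  let outstr := PySem.List.pyGetD no_dup 0 ""
  (PySem.List.pyRange 1 (PySem.List.len no_dup)).foldl
    (fun outstr i => outstr ++ " " ++ PySem.List.pyGetD no_dup i "") outstr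

-- ===== PORT B =====
def alpha_sort_alt (string : String) : String :=
  let words := PySem.List.sorted (PySem.Str.split₀ string) (fun x => x)
  let outstr := PySem.List.pyGetD words 0 ""
  let prev := PySem.List.pyGetD words 0 ""
  let r := (PySem.List.slice words (some 1) none).foldl
    (fun (st : String × String) w => if w ≠ st.2 then (st.1 ++ " " ++ w, w) else st)
    (outstr, prev)
  r.1

-- ===== PRECONDITION & SPEC =====
-- Pre_ excludes exactly the inputs with no words (empty/whitespace-only strings), on which
-- Python A raises IndexError at no_dup[0] (and B likewise at words[0]).
def Pre_alpha_sort (string : String) : Prop := PySem.Str.split₀ string ≠ []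
instance (string : String) : Decidable (Pre_alpha_sort string) := by unfold Pre_alpha_sort; infer_instance
def pvWitness_alpha_sort : String := "b a a c"
def Spec_alpha_sort (string : String) (out : String) : Prop := out = alpha_sort_alt string
instance (string : String) (out : String) : Decidable (Spec_alpha_sort string out) := by unfold Spec_alpha_sort; infer_instance

-- ===== CLAIM (what is proved, stated in full; the proofs are below) =====
def Claim_equal_alpha_sort : Prop := ∀ (string : String), Dom_alpha_sort string → Pre_alpha_sort string → Spec_alpha_sort string (alpha_sort string)

-- ===== LEMMAS AND PROOFS =====

-- adjacency dedup: drop each word equal to the previous kept word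
def destA (p : String) : List String → List String
  | [] => []
  | w :: t => if w = p then destA p t else w :: destA w t

theorem destA_subset {x p : String} : ∀ {t : List String}, x ∈ destA p t → x ∈ t := by
  intro t
  induction t generalizing p with
  | nil => simp [destA]
  | cons w t ih =>
    simp only [destA]
    split_ifs
    · exact fun h => List.mem_cons_of_mem _ (ih h)
    · intro h
      rcases List.mem_cons.1 h with h | h
      · exact h ▸ List.mem_cons_self
      · exact List.mem_cons_of_mem _ (ih h)

theorem mem_destA {x : String} : ∀ {t : List String} {p : String},
    (p :: t).Pairwise (· ≤ ·) → (x ∈ destA p t ↔ x ∈ t ∧ x ≠ p) := by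
  intro t
  induction t with
  | nil => simp [destA]
  | cons w t ih =>
    intro p hp
    have hp' : (p :: t).Pairwise (· ≤ ·) := hp.sublist (by simp)
    have hw : (w :: t).Pairwise (· ≤ ·) := hp.sublist (by simp)
    simp only [destA]
    split_ifs with hwp
    · subst hwp
      rw [ih hp']
      constructor
      · rintro ⟨h1, h2⟩; exact ⟨List.mem_cons_of_mem _ h1, h2⟩
      · rintro ⟨h1, h2⟩
        rcases List.mem_cons.1 h1 with h | h
        · exact absurd h h2
        · exact ⟨h, h2⟩
    · have hpw : p ≤ w := (List.pairwise_cons.1 hp).1 w List.mem_cons_self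
      have hplt : p < w := lt_of_le_of_ne hpw (fun h => hwp h.symm)
      have htgt : ∀ y ∈ t, w ≤ y := (List.pairwise_cons.1 hw).1
      constructor
      · intro h
        rcases List.mem_cons.1 h with h | h
        · subst h; exact ⟨List.mem_cons_self, fun h => hwp h⟩
        · have hxt := destA_subset h
          have : w ≤ x := htgt x hxt
          exact ⟨List.mem_cons_of_mem _ hxt, fun hxp => absurd (hxp ▸ this) (not_le.2 hplt)⟩
      · rintro ⟨h1, h2⟩
        rcases List.mem_cons.1 h1 with h | h
        · exact h ▸ List.mem_cons_self
        · by_cases hxw : x = w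
          · exact hxw ▸ List.mem_cons_self
          · exact List.mem_cons_of_mem _ ((ih hw).2 ⟨h, hxw⟩)

theorem pairwise_destA : ∀ {t : List String} {p : String},
    (p :: t).Pairwise (· ≤ ·) → (p :: destA p t).Pairwise (· < ·) := by
  intro t
  induction t with
  | nil => simp [destA]
  | cons w t ih =>
    intro p hp
    have hp' : (p :: t).Pairwise (· ≤ ·) := hp.sublist (by simp)
    have hw : (w :: t).Pairwise (· ≤ ·) := hp.sublist (by simp)
    simp only [destA]
    split_ifs with hwp
    · subst hwp; exact ih hp'
    · have hpw : p ≤ w := (List.pairwise_cons.1 hp).1 w List.mem_cons_self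
      have hplt : p < w := lt_of_le_of_ne hpw (fun h => hwp h.symm)
      have htail := ih hw
      refine List.pairwise_cons.2 ⟨?_, htail⟩
      intro y hy
      rcases List.mem_cons.1 hy with h | h
      · exact h ▸ hplt
      · have : w ≤ y := (List.pairwise_cons.1 hw).1 y (destA_subset h)
        exact lt_of_lt_of_le hplt this

theorem foldl_destA :
    ∀ (t : List String) (out p : String),
      (t.foldl (fun (st : String × String) w => if w ≠ st.2 then (st.1 ++ " " ++ w, w) else st) (out, p)).1
        = (destA p t).foldl (fun s w => s ++ " " ++ w) out := by
  intro t
  induction t with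
  | nil => intro out p; simp [destA]
  | cons w t ih =>
    intro out p
    simp only [List.foldl_cons, destA]
    by_cases hwp : w = p
    · rw [if_pos hwp, if_neg (by simp [hwp])]
      exact ih out p
    · rw [if_neg hwp, if_pos (by simp [hwp]), List.foldl_cons]
      exact ih (out ++ " " ++ w) w

theorem adjDedup_eq_sorted_set (ws : List String) {h : String} {t : List String}
    (hsort : PySem.List.sorted ws (fun x => x) = h :: t) :
    PySem.List.sorted (PySem.Set.ofList ws) (fun x => x) = h :: destA h t := by
  have hpw : (h :: t).Pairwise (· ≤ ·) := by
    have := PySem.List.sorted_pairwise ws (fun x => x)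
    rwa [hsort] at this
  have hlt : (h :: destA h t).Pairwise (· < ·) := pairwise_destA hpw
  apply PySem.List.sorted_eq_of_perm_of_pairwise_lt
  · have hnd : (h :: destA h t).Nodup := hlt.imp ne_of_lt
    apply List.perm_of_nodup_nodup_toFinset_eq hnd (PySem.Set.nodup_ofList ws)
    ext x
    simp only [List.mem_toFinset, PySem.Set.mem_ofList, List.mem_cons, mem_destA hpw]
    constructor
    · rintro (rfl | ⟨hx, _⟩)
      · have : x ∈ PySem.List.sorted ws (fun x => x) := by rw [hsort]; exact List.mem_cons_self
        exact (PySem.List.mem_sorted ws _ false x).1 this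
      · have : x ∈ PySem.List.sorted ws (fun x => x) := by
          rw [hsort]; exact List.mem_cons_of_mem _ hx
        exact (PySem.List.mem_sorted ws _ false x).1 this
    · intro hx
      have : x ∈ h :: t := by
        rw [← hsort]; exact (PySem.List.mem_sorted ws _ false x).2 hx
      rcases List.mem_cons.1 this with h' | h'
      · exact Or.inl h'
      · by_cases hxh : x = h
        · exact Or.inl hxh
        · exact Or.inr ⟨h', hxh⟩
  · exact hlt

-- ===== VERDICT (by name: the statement is the Claim_ definition above) =====
theorem alpha_sort_spec : Claim_equal_alpha_sort := by
  intro string _ hpre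
  show alpha_sort string = alpha_sort_alt string
  obtain ⟨h, t, hTeq⟩ : ∃ h t, PySem.List.sorted (PySem.Str.split₀ string) (fun x => x) = h :: t := by
    cases hE : PySem.List.sorted (PySem.Str.split₀ string) (fun x => x) with
    | nil => exact absurd ((PySem.List.sorted_eq_nil_iff _ _ _).1 hE) hpre
    | cons a b => exact ⟨a, b, rfl⟩
  have hS := adjDedup_eq_sorted_set (PySem.Str.split₀ string) hTeq
  have hget1 : PySem.List.pyGetD (h :: destA h t) 0 "" = h := by
    simp [PySem.List.pyGetD]
  have hget2 : PySem.List.pyGetD (h :: t) 0 "" = h := by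
    simp [PySem.List.pyGetD]
  simp only [alpha_sort, alpha_sort_alt, hS, hTeq, PySem.List.slice_from_one, List.tail_cons,
    hget1, hget2]
  rw [PySem.List.foldl_pyRange_pyGetD (h :: destA h t) "" (fun s w => s ++ " " ++ w) _ (by norm_num)]
  rw [foldl_destA t h h]
  simp
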